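-- pv_equiv track=rewrite | github.com/JonathanHaudenschild/SCC_Schichtplan_Algorithmus | simulatedAnnealing_ref.py | create_ranking_array
-- ===== SOURCE A (Python) =====
-- def create_ranking_array(
--     shift_ranking_list, shift_type_ranking_list, num_of_shifts, num_of_shift_types
-- ):
--     cost_array = [0] * num_of_shifts
--
--     for cost, shifts in shift_ranking_list:
--         for shift_index in shifts:
--             # Check if this shift_index matches a shift type
--             for type_cost, shifts in shift_type_ranking_list:
--                 for shift in shifts:
--                     if (
--                         shift_index % num_of_shift_types == shift
--                     ):  # Assuming there are 4 shift types
--                         cost_array[shift_index] = type_cost * cost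
--
--     return cost_array
-- ===== SOURCE B (Python) =====
-- def create_ranking_array(
--     shift_ranking_list, shift_type_ranking_list, num_of_shifts, num_of_shift_types
-- ):
--     # Build residue -> type_cost table once (last entry wins, as in A's rescans).
--     type_cost_by_residue = {}
--     for type_cost, shifts in shift_type_ranking_list:
--         for shift in shifts:
--             type_cost_by_residue[shift] = type_cost
--
--     cost_array = [0] * num_of_shifts
--     if not type_cost_by_residue:
--         return cost_array
--
--     # Last cost per shift index (last entry wins).
--     cost_by_index = {}
--     for cost, shifts in shift_ranking_list:
--         for shift_index in shifts:
--             cost_by_index[shift_index] = cost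
--
--     # One combining pass.
--     for shift_index, cost in cost_by_index.items():
--         r = shift_index % num_of_shift_types
--         if r in type_cost_by_residue:
--             cost_array[shift_index] = type_cost_by_residue[r] * cost
--     return cost_array
-- ===== Notes on version B (the rewrite author's own statement) =====
-- stated objective: faster
-- what changed: A rescans the whole type-ranking list for every shift index (4 nested loops); B builds a residue->type_cost dict and a shift_index->cost dict once (last entry wins, like A's overwrites) and fills the array in one combining pass over the distinct shift indices.
-- outside the precondition, e.g. on create_ranking_array([(5, [-2]), (7, [0]), (9, [-2])], [(1, [0])], 2, 1): A returns [9, 0], B returns [7, 0]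
import Mathlib
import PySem

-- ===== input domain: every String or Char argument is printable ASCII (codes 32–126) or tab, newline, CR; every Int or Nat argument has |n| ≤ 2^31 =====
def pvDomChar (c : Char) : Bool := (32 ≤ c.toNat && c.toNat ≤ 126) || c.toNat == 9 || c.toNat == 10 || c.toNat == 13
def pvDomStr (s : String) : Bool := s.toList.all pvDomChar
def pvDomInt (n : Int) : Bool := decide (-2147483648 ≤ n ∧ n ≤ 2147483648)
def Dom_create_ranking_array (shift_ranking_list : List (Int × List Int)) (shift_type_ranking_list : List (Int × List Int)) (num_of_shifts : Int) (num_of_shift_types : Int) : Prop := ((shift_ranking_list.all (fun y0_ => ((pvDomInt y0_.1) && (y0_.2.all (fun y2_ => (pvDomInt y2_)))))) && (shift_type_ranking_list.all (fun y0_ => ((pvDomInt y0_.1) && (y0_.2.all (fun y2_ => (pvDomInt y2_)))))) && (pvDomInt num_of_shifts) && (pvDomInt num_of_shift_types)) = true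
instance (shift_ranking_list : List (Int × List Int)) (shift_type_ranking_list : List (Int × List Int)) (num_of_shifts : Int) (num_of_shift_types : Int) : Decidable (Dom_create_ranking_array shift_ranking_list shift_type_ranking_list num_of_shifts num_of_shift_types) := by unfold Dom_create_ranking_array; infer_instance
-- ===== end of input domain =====

-- B replaces A's nested rescans of the type-ranking list by two last-wins dict builds
-- plus one combining pass over the distinct shift indices (objective: faster).

-- ===== PORT A =====
def create_ranking_array (shift_ranking_list : List (Int × List Int)) (shift_type_ranking_list : List (Int × List Int)) (num_of_shifts : Int) (num_of_shift_types : Int) : List Int :=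
  let cost_array : List Int := List.replicate num_of_shifts.toNat 0
  shift_ranking_list.foldl (fun arr p =>
    p.2.foldl (fun arr shift_index =>
      shift_type_ranking_list.foldl (fun arr q =>
        q.2.foldl (fun arr shift =>
          if PySem.Int.mod shift_index num_of_shift_types == shift
          then PySem.List.pySetD arr shift_index (q.1 * p.1)
          else arr) arr) arr) arr) cost_array

-- ===== PORT B =====
def create_ranking_array_alt (shift_ranking_list : List (Int × List Int)) (shift_type_ranking_list : List (Int × List Int)) (num_of_shifts : Int) (num_of_shift_types : Int) : List Int :=
  let table : PySem.Dict Int Int :=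
    shift_type_ranking_list.foldl (fun d q => q.2.foldl (fun d s => d.insert s q.1) d) PySem.Dict.empty
  let cost_array : List Int := List.replicate num_of_shifts.toNat 0
  if table.size == 0 then cost_array
  else
    let cost_by_index : PySem.Dict Int Int :=
      shift_ranking_list.foldl (fun d p => p.2.foldl (fun d i => d.insert i p.1) d) PySem.Dict.empty
    cost_by_index.items.foldl (fun arr kv =>
      let r := PySem.Int.mod kv.1 num_of_shift_types
      if table.contains r then PySem.List.pySetD arr kv.1 (table.getD r 0 * kv.2) else arr) cost_array

-- ===== PRECONDITION & SPEC =====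
-- Pre_ excludes (a) inputs where A raises: ZeroDivisionError (num_of_shift_types = 0 with the
-- modulo actually reached) and IndexError (a shift index outside [-n, n) whose residue matches
-- a type entry); and (b) negative in-range shift indices whose residue matches a type entry:
-- there A returns a value only through Python's negative-index wraparound, under which two
-- distinct dict keys alias one array slot and the result depends on A's accidental write order.
-- Unmatched indices (never written) are admitted wherever they lie.
def Pre_create_ranking_array (shift_ranking_list : List (Int × List Int)) (shift_type_ranking_list : List (Int × List Int)) (num_of_shifts : Int) (num_of_shift_types : Int) : Prop :=
  (∀ p ∈ shift_ranking_list, ∀ i ∈ p.2, (0 ≤ i ∧ i < num_of_shifts) ∨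
    (∀ q ∈ shift_type_ranking_list, ∀ s ∈ q.2, PySem.Int.mod i num_of_shift_types ≠ s)) ∧
  (num_of_shift_types = 0 → (∀ p ∈ shift_ranking_list, p.2 = []) ∨ (∀ q ∈ shift_type_ranking_list, q.2 = []))
instance (shift_ranking_list : List (Int × List Int)) (shift_type_ranking_list : List (Int × List Int)) (num_of_shifts : Int) (num_of_shift_types : Int) : Decidable (Pre_create_ranking_array shift_ranking_list shift_type_ranking_list num_of_shifts num_of_shift_types) := by unfold Pre_create_ranking_array; infer_instance

def pvWitness_create_ranking_array : (List (Int × List Int)) × (List (Int × List Int)) × Int × Int :=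
  ([(2, [0, 1])], [(3, [0])], 3, 2)

def Spec_create_ranking_array (shift_ranking_list : List (Int × List Int)) (shift_type_ranking_list : List (Int × List Int)) (num_of_shifts : Int) (num_of_shift_types : Int) (out : List Int) : Prop := out = create_ranking_array_alt shift_ranking_list shift_type_ranking_list num_of_shifts num_of_shift_types
instance (shift_ranking_list : List (Int × List Int)) (shift_type_ranking_list : List (Int × List Int)) (num_of_shifts : Int) (num_of_shift_types : Int) (out : List Int) : Decidable (Spec_create_ranking_array shift_ranking_list shift_type_ranking_list num_of_shifts num_of_shift_types out) := by unfold Spec_create_ranking_array; infer_instance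

-- ===== CLAIM (what is proved, stated in full; the proofs are below) =====
def Claim_equal_create_ranking_array : Prop := ∀ (shift_ranking_list : List (Int × List Int)) (shift_type_ranking_list : List (Int × List Int)) (num_of_shifts : Int) (num_of_shift_types : Int), Dom_create_ranking_array shift_ranking_list shift_type_ranking_list num_of_shifts num_of_shift_types → Pre_create_ranking_array shift_ranking_list shift_type_ranking_list num_of_shifts num_of_shift_types → Spec_create_ranking_array shift_ranking_list shift_type_ranking_list num_of_shifts num_of_shift_types (create_ranking_array shift_ranking_list shift_type_ranking_list num_of_shifts num_of_shift_types)

-- ===== LEMMAS AND PROOFS =====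

def pvFlat (l : List (Int × List Int)) : List (Int × Int) :=
  l.flatMap (fun p => p.2.map (fun x => (p.1, x)))
def pvMatchT (strl : List (Int × List Int)) (t idx : Int) : Option (Int × Int) :=
  (pvFlat strl).reverse.find? (fun q => PySem.Int.mod idx t == q.2)
def pvApply (strl : List (Int × List Int)) (t : Int) (arr : List Int) (p : Int × Int) : List Int :=
  match pvMatchT strl t p.2 with
  | some q => PySem.List.pySetD arr p.2 (q.1 * p.1)
  | none => arr

theorem pv_flatfold {α : Type} (l : List (Int × List Int)) (g : α → Int × Int → α) (a : α) :
    l.foldl (fun a p => p.2.foldl (fun a x => g a (p.1, x)) a) a = (pvFlat l).foldl g a := by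
  induction l generalizing a with
  | nil => rfl
  | cons p l ih => simp [pvFlat, List.foldl_append, List.foldl_map, ih]

theorem pv_lastset (L : List (Int × Int)) (arr : List Int) (t idx c : Int) (h0 : 0 ≤ idx) :
    L.foldl (fun arr q => if PySem.Int.mod idx t == q.2 then PySem.List.pySetD arr idx (q.1 * c) else arr) arr
      = match L.reverse.find? (fun q => PySem.Int.mod idx t == q.2) with
        | some q => PySem.List.pySetD arr idx (q.1 * c)
        | none => arr := by
  induction L generalizing arr with
  | nil => rfl
  | cons q L ih =>
    simp only [List.foldl_cons, List.reverse_cons, List.find?_append, ih]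
    cases hf : L.reverse.find? (fun q => PySem.Int.mod idx t == q.2) with
    | some q' =>
      by_cases h : PySem.Int.mod idx t = q.2
      · simp [h, PySem.List.pySetD_of_nonneg _ _ h0, List.set_set]
      · simp [h]
    | none =>
      by_cases h : PySem.Int.mod idx t = q.2
      · simp [h]
      · simp [h]

theorem pv_lastset_none (L : List (Int × Int)) (arr : List Int) (t idx c : Int)
    (h : L.reverse.find? (fun q => PySem.Int.mod idx t == q.2) = none) :
    L.foldl (fun arr q => if PySem.Int.mod idx t == q.2 then PySem.List.pySetD arr idx (q.1 * c) else arr) arr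
      = arr := by
  rw [List.find?_eq_none] at h
  induction L generalizing arr with
  | nil => rfl
  | cons q L ih =>
    have hq := h q (by simp)
    rw [List.foldl_cons, if_neg (by simpa using hq)]
    exact ih _ (fun x hx => h x (List.mem_reverse.mpr (List.mem_cons_of_mem q (List.mem_reverse.mp hx))))

theorem pv_A_eq_foldl (srl strl : List (Int × List Int)) (n t : Int)
    (h0 : ∀ p ∈ pvFlat srl, 0 ≤ p.2 ∨ pvMatchT strl t p.2 = none) :
    create_ranking_array srl strl n t = (pvFlat srl).foldl (pvApply strl t) (List.replicate n.toNat 0) := by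
  have h1 := pv_flatfold srl (fun (arr : List Int) (x : Int × Int) =>
      strl.foldl (fun arr q => q.2.foldl (fun arr s =>
        if PySem.Int.mod x.2 t == s then PySem.List.pySetD arr x.2 (q.1 * x.1) else arr) arr) arr)
      (List.replicate n.toNat 0)
  refine Eq.trans (Eq.trans (by rfl) h1) ?_
  apply PySem.List.foldl_congr_mem
  intro arr p hp
  have h2 := pv_flatfold strl (fun (arr : List Int) (q : Int × Int) =>
      if PySem.Int.mod p.2 t == q.2 then PySem.List.pySetD arr p.2 (q.1 * p.1) else arr) arr
  refine Eq.trans (Eq.trans (by rfl) h2) ?_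
  cases h0 p hp with
  | inl hpos =>
    rw [pv_lastset _ _ t p.2 p.1 hpos]
    rfl
  | inr hnone =>
    rw [pv_lastset_none _ _ t p.2 p.1 hnone]
    unfold pvApply
    rw [hnone]

theorem pv_get?_insert_fold (L : List (Int × Int)) (d : PySem.Dict Int Int) (r : Int) :
    (L.foldl (fun d q => d.insert q.2 q.1) d).get? r
      = match L.reverse.find? (fun q => r == q.2) with
        | some q => some q.1
        | none => d.get? r := by
  induction L generalizing d with
  | nil => rfl
  | cons q L ih =>
    simp only [List.foldl_cons, List.reverse_cons, List.find?_append, ih]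
    cases hf : L.reverse.find? (fun q => r == q.2) with
    | some q' => simp
    | none =>
      by_cases h : r = q.2
      · simp [h, PySem.Dict.get?_insert_self]
      · simp [h, PySem.Dict.get?_insert_of_ne _ _ h]

theorem pv_len_foldl (strl : List (Int × List Int)) (t : Int) (L : List (Int × Int)) (arr : List Int) :
    (L.foldl (pvApply strl t) arr).length = arr.length := by
  induction L generalizing arr with
  | nil => rfl
  | cons p L ih =>
    rw [List.foldl_cons, ih]
    unfold pvApply
    cases pvMatchT strl t p.2 with
    | some q => simp [PySem.List.length_pySetD]
    | none => rfl

theorem pv_char (strl : List (Int × List Int)) (t : Int) (L : List (Int × Int)) :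
    ∀ (arr : List Int), (∀ p ∈ L, (0 ≤ p.2 ∧ p.2 < (arr.length : Int)) ∨ pvMatchT strl t p.2 = none) → ∀ (j : Nat), j < arr.length →
    (L.foldl (pvApply strl t) arr)[j]? =
      match L.reverse.find? (fun p => (j : Int) == p.2) with
      | some p => (match pvMatchT strl t (j : Int) with
                   | some q => some (q.1 * p.1)
                   | none => arr[j]?)
      | none => arr[j]? := by
  induction L with
  | nil => intro arr _ j hj; rfl
  | cons p L ih =>
    intro arr hrange j hj
    have hp := hrange p (by simp)
    have harr' : (pvApply strl t arr p).length = arr.length := by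
      unfold pvApply; cases pvMatchT strl t p.2 <;> simp [PySem.List.length_pySetD]
    rw [List.foldl_cons, ih (pvApply strl t arr p)
      (by intro q hq; rw [harr']; exact hrange q (by simp [hq])) j (by rw [harr']; exact hj)]
    simp only [List.reverse_cons, List.find?_append]
    cases hf : L.reverse.find? (fun p => (j : Int) == p.2) with
    | some p' =>
      simp only [Option.some_or]
      cases hm : pvMatchT strl t (j : Int) with
      | some q => rfl
      | none =>
        by_cases hpj : p.2 = (j : Int)
        · unfold pvApply; rw [hpj, hm]
        · unfold pvApply
          cases hm2 : pvMatchT strl t p.2 with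
          | none => rfl
          | some q =>
            have hpb := hp.resolve_right (by rw [hm2]; simp)
            show (PySem.List.pySetD arr p.2 (q.1 * p.1))[j]? = arr[j]?
            rw [PySem.List.pySetD_of_nonneg _ _ hpb.1,
                List.getElem?_set_ne (by omega : p.2.toNat ≠ j)]
    | none =>
      simp only [Option.none_or]
      by_cases hpj : p.2 = (j : Int)
      · have hb : ((j : Int) == p.2) = true := by simp [hpj]
        simp only [List.find?_cons, hb]
        cases hm : pvMatchT strl t (j : Int) with
        | some q =>
          unfold pvApply
          rw [hpj, hm]
          show (PySem.List.pySetD arr (j : Int) (q.1 * p.1))[j]? = some (q.1 * p.1)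
          rw [PySem.List.pySetD_of_nonneg _ _ (by positivity : (0:Int) ≤ (j:Int))]
          simp [hj]
        | none =>
          unfold pvApply; rw [hpj, hm]
      · have hb : ((j : Int) == p.2) = false := by simp; omega
        simp only [List.find?_cons, hb]
        unfold pvApply
        cases hm2 : pvMatchT strl t p.2 with
        | none => rfl
        | some q =>
          have hpb := hp.resolve_right (by rw [hm2]; simp)
          show (PySem.List.pySetD arr p.2 (q.1 * p.1))[j]? = arr[j]?
          rw [PySem.List.pySetD_of_nonneg _ _ hpb.1,
              List.getElem?_set_ne (by omega : p.2.toNat ≠ j)]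

theorem pv_dictfold (l : List (Int × List Int)) :
    l.foldl (fun d q => q.2.foldl (fun d s => d.insert s q.1) d) (PySem.Dict.empty : PySem.Dict Int Int)
      = (pvFlat l).foldl (fun d q => d.insert q.2 q.1) PySem.Dict.empty :=
  pv_flatfold l (fun (d : PySem.Dict Int Int) (q : Int × Int) => d.insert q.2 q.1) _

theorem pv_keys_dictfold (L : List (Int × Int)) :
    ((L.foldl (fun d q => d.insert q.2 q.1) (PySem.Dict.empty : PySem.Dict Int Int))).keys
      = PySem.Set.ofList (L.map (·.2)) := by
  have h := PySem.Dict.keys_foldl_insert_key (ν := Int) L (fun q => q.2) (fun _ q => q.1) PySem.Dict.empty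
  simpa [PySem.Dict.keys_empty, PySem.Set.update_nil_left] using h

theorem pv_nodup_keys_dictfold (L : List (Int × Int)) :
    ((L.foldl (fun d q => d.insert q.2 q.1) (PySem.Dict.empty : PySem.Dict Int Int))).keys.Nodup := by
  rw [pv_keys_dictfold]; exact PySem.Set.nodup_ofList _

theorem pv_dict_get? (L : List (Int × Int)) (r : Int) :
    (L.foldl (fun d q => d.insert q.2 q.1) (PySem.Dict.empty : PySem.Dict Int Int)).get? r
      = (L.reverse.find? (fun q => r == q.2)).map (·.1) := by
  rw [pv_get?_insert_fold]
  cases L.reverse.find? (fun q => r == q.2) <;> simp [PySem.Dict.get?_empty]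

theorem pv_size_zero (L : List (Int × Int))
    (h : (L.foldl (fun d q => d.insert q.2 q.1) (PySem.Dict.empty : PySem.Dict Int Int)).size = 0) :
    L = [] := by
  cases L with
  | nil => rfl
  | cons q L' =>
    exfalso
    have hk : q.2 ∈ ((((q :: L').foldl (fun d q => d.insert q.2 q.1) (PySem.Dict.empty : PySem.Dict Int Int))).keys) := by
      rw [pv_keys_dictfold, PySem.Set.mem_ofList]
      exact List.mem_map_of_mem (List.mem_cons_self ..)
    have hlen : (((q :: L').foldl (fun d q => d.insert q.2 q.1) (PySem.Dict.empty : PySem.Dict Int Int))).keys.length = 0 := by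
      simpa [PySem.Dict.keys, PySem.Dict.size] using h
    rw [List.length_eq_zero_iff] at hlen
    rw [hlen] at hk
    simp at hk

theorem pv_no_write (strl : List (Int × List Int)) (t : Int) (h : pvFlat strl = [])
    (L : List (Int × Int)) (arr : List Int) : L.foldl (pvApply strl t) arr = arr := by
  induction L generalizing arr with
  | nil => rfl
  | cons p L ih =>
    rw [List.foldl_cons]
    have : pvApply strl t arr p = arr := by unfold pvApply pvMatchT; rw [h]; rfl
    rw [this, ih]

theorem pv_main (srl strl : List (Int × List Int)) (n t : Int)
    (hpre : ∀ p ∈ srl, ∀ i ∈ p.2, (0 ≤ i ∧ i < n) ∨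
      (∀ q ∈ strl, ∀ s ∈ q.2, PySem.Int.mod i t ≠ s)) :
    create_ranking_array srl strl n t = create_ranking_array_alt srl strl n t := by
  have hflat : ∀ p ∈ pvFlat srl, (0 ≤ p.2 ∧ p.2 < n) ∨ pvMatchT strl t p.2 = none := by
    intro p hp
    simp only [pvFlat, List.mem_flatMap, List.mem_map] at hp
    obtain ⟨r, hr, x, hx, rfl⟩ := hp
    cases hpre r hr x hx with
    | inl h => exact Or.inl h
    | inr h =>
      refine Or.inr (List.find?_eq_none.mpr ?_)
      intro q hq
      rw [List.mem_reverse] at hq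
      simp only [pvFlat, List.mem_flatMap, List.mem_map] at hq
      obtain ⟨r', hr', x', hx', rfl⟩ := hq
      simpa using h r' hr' x' hx'
  rw [pv_A_eq_foldl srl strl n t (fun p hp => (hflat p hp).imp_left And.left)]
  simp only [create_ranking_array_alt]
  rw [pv_dictfold strl, pv_dictfold srl]
  by_cases hsz : ((pvFlat strl).foldl (fun d q => d.insert q.2 q.1) (PySem.Dict.empty : PySem.Dict Int Int)).size = 0
  · have hnil : pvFlat strl = [] := pv_size_zero _ hsz
    simp only [hsz, beq_self_eq_true, if_pos]
    exact pv_no_write strl t hnil _ _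
  · have hbe : (((pvFlat strl).foldl (fun d q => d.insert q.2 q.1) (PySem.Dict.empty : PySem.Dict Int Int)).size == 0) = false := by
      simp [hsz]
    rw [hbe]
    simp only [Bool.false_eq_true, if_neg, not_false_iff]
    set T := (pvFlat strl).foldl (fun d q => d.insert q.2 q.1) (PySem.Dict.empty : PySem.Dict Int Int) with hT
    set C := (pvFlat srl).foldl (fun d q => d.insert q.2 q.1) (PySem.Dict.empty : PySem.Dict Int Int) with hC
    have hnodup : C.keys.Nodup := pv_nodup_keys_dictfold _
    have hkeysC : C.keys = PySem.Set.ofList ((pvFlat srl).map (·.2)) := pv_keys_dictfold _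
    have hCget : ∀ k : Int, C.get? k = ((pvFlat srl).reverse.find? (fun q => k == q.2)).map (·.1) :=
      fun k => pv_dict_get? _ k
    have hTmatch : ∀ k : Int, T.get? (PySem.Int.mod k t) = (pvMatchT strl t k).map (·.1) :=
      fun k => pv_dict_get? _ (PySem.Int.mod k t)
    rw [PySem.Dict.items_eq_map_keys C hnodup 0, List.foldl_map]
    have hstep : ∀ (arr : List Int), ∀ k ∈ C.keys,
        (if T.contains (PySem.Int.mod k t) then PySem.List.pySetD arr k (T.getD (PySem.Int.mod k t) 0 * C.getD k 0) else arr)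
          = pvApply strl t arr (C.getD k 0, k) := by
      intro arr k _
      rw [PySem.Dict.contains_eq_isSome_get?, PySem.Dict.getD_eq_get?_getD, hTmatch k]
      cases hm : pvMatchT strl t k with
      | some q => simp [pvApply, hm]
      | none => simp [pvApply, hm]
    rw [PySem.List.foldl_congr_mem C.keys _ (fun arr k => pvApply strl t arr (C.getD k 0, k)) _ hstep]
    have hLB : C.keys.foldl (fun arr k => pvApply strl t arr (C.getD k 0, k)) (List.replicate n.toNat 0)
          = (C.keys.map (fun k => (C.getD k 0, k))).foldl (pvApply strl t) (List.replicate n.toNat 0) := by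
      rw [List.foldl_map]
    rw [hLB]
    -- pointwise comparison of the two pvApply folds
    have hrA : ∀ p ∈ pvFlat srl, (0 ≤ p.2 ∧ p.2 < ((List.replicate n.toNat (0:Int)).length : Int)) ∨ pvMatchT strl t p.2 = none := by
      intro p hp
      refine (hflat p hp).imp_left ?_
      intro h
      rw [List.length_replicate]
      omega
    have hrB : ∀ p ∈ C.keys.map (fun k => (C.getD k 0, k)), (0 ≤ p.2 ∧ p.2 < ((List.replicate n.toNat (0:Int)).length : Int)) ∨ pvMatchT strl t p.2 = none := by
      intro p hp
      rw [List.mem_map] at hp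
      obtain ⟨k, hk, rfl⟩ := hp
      rw [hkeysC, PySem.Set.mem_ofList, List.mem_map] at hk
      obtain ⟨q, hq, hq2⟩ := hk
      refine (hflat q hq).imp ?_ ?_
      · intro h
        rw [List.length_replicate]
        omega
      · intro h
        rw [← hq2]
        exact h
    apply List.ext_getElem?
    intro j
    by_cases hj : j < n.toNat
    · rw [pv_char strl t (pvFlat srl) _ hrA j (by simpa using hj),
          pv_char strl t (C.keys.map (fun k => (C.getD k 0, k))) _ hrB j (by simpa using hj)]
      have hFB : (C.keys.map (fun k => (C.getD k 0, k))).reverse.find? (fun p => (j : Int) == p.2)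
          = (C.keys.reverse.find? (fun k => (j : Int) == k)).map (fun k => (C.getD k 0, k)) := by
        rw [← List.map_reverse, List.find?_map]
        rfl
      cases hFA : (pvFlat srl).reverse.find? (fun p => (j : Int) == p.2) with
      | none =>
        have hninK : (j : Int) ∉ C.keys := by
          rw [hkeysC, PySem.Set.mem_ofList]
          intro hmem
          rw [List.mem_map] at hmem
          obtain ⟨q, hq, hq2⟩ := hmem
          have := List.find?_eq_none.mp hFA q (List.mem_reverse.mpr hq)
          simp [hq2] at this
        have hnone : C.keys.reverse.find? (fun k => (j : Int) == k) = none := by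
          rw [List.find?_eq_none]
          intro x hx
          simp only [beq_iff_eq]
          intro he
          exact hninK (he ▸ List.mem_reverse.mp hx)
        rw [hFB, hnone]
        rfl
      | some p =>
        have hpj : p.2 = (j : Int) := by
          have := List.find?_some hFA
          simp only [beq_iff_eq] at this
          omega
        have hjK : (j : Int) ∈ C.keys := by
          rw [hkeysC, PySem.Set.mem_ofList]
          exact List.mem_map.mpr ⟨p, List.mem_reverse.mp (List.mem_of_find?_eq_some hFA), hpj⟩
        obtain ⟨k0, hk0⟩ : ∃ k0, C.keys.reverse.find? (fun k => (j : Int) == k) = some k0 :=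
          Option.isSome_iff_exists.mp (List.find?_isSome.mpr ⟨(j : Int), List.mem_reverse.mpr hjK, by simp⟩)
        have hk0j : k0 = (j : Int) := by
          have := List.find?_some hk0
          simp only [beq_iff_eq] at this
          omega
        have hgd : C.getD (j : Int) 0 = p.1 := by
          rw [PySem.Dict.getD_eq_get?_getD, hCget, hFA]
          rfl
        rw [hFB, hk0, hk0j]
        simp only [Option.map_some]
        cases hm : pvMatchT strl t (j : Int) with
        | none => rfl
        | some q => simp [hgd]
    · rw [List.getElem?_eq_none (by rw [pv_len_foldl, List.length_replicate]; omega),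
          List.getElem?_eq_none (by rw [pv_len_foldl, List.length_replicate]; omega)]

-- ===== VERDICT (by name: the statement is the Claim_ definition above) =====
theorem create_ranking_array_spec : Claim_equal_create_ranking_array := by
  intro srl strl n t _ hpre
  unfold Spec_create_ranking_array
  exact pv_main srl strl n t hpre.1
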